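-- pv_equiv track=rewrite | github.com/praveen686/7hills | QuantLaxmi/quantlaxmi/data/collectors/news/crypto_news.py | _extract_crypto_symbols
-- ===== SOURCE A (Python) =====
-- def _extract_crypto_symbols(title: str) -> list[str]:
--     """Extract crypto ticker symbols from a title."""
--     hl = title.upper()
--     symbols = []
--     known = {
--         "BTC": "BTC", "BITCOIN": "BTC",
--         "ETH": "ETH", "ETHEREUM": "ETH",
--         "SOL": "SOL", "SOLANA": "SOL",
--         "BNB": "BNB", "XRP": "XRP", "RIPPLE": "XRP",
--         "ADA": "ADA", "CARDANO": "ADA",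
--         "DOGE": "DOGE", "DOGECOIN": "DOGE",
--         "AVAX": "AVAX", "DOT": "DOT", "MATIC": "MATIC",
--         "LINK": "LINK", "UNI": "UNI",
--     }
--     for keyword, symbol in known.items():
--         if keyword in hl and symbol not in symbols:
--             symbols.append(symbol)
--     return symbols
-- ===== SOURCE B (Python) =====
-- def _extract_crypto_symbols(title: str) -> list[str]:
--     """Extract crypto ticker symbols from a title."""
--     hl = title.upper()
--     groups = {
--         "BTC": ["BTC", "BITCOIN"],
--         "ETH": ["ETH", "ETHEREUM"],
--         "SOL": ["SOL", "SOLANA"],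
--         "BNB": ["BNB"],
--         "XRP": ["XRP", "RIPPLE"],
--         "ADA": ["ADA", "CARDANO"],
--         "DOGE": ["DOGE", "DOGECOIN"],
--         "AVAX": ["AVAX"],
--         "DOT": ["DOT"],
--         "MATIC": ["MATIC"],
--         "LINK": ["LINK"],
--         "UNI": ["UNI"],
--     }
--     return [sym for sym, kws in groups.items() if any(k in hl for k in kws)]
-- ===== Notes on version B (the rewrite author's own statement) =====
-- stated objective: simpler
-- what changed: Replaces the flat keyword->symbol loop with its symbol-not-in-result dedup scan by a grouped symbol->keywords table filtered with any(), so the output is a plain comprehension with no dedup check.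
import Mathlib
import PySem

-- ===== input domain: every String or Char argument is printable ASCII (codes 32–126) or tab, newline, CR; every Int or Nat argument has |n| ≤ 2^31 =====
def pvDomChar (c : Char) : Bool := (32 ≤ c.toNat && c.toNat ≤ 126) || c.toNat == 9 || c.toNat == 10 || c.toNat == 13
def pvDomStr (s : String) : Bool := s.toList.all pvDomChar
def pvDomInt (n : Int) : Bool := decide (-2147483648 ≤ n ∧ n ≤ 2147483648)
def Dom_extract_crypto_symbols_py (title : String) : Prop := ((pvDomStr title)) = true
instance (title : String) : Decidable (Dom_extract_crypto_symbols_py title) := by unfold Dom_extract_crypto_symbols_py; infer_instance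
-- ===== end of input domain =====

-- B replaces A's flat keyword loop with a dedup scan by a grouped symbol->keywords table
-- filtered with any(); objective: simpler (no explicit dedup).

-- ===== PORT A =====
-- the dict literal known, as an insertion-ordered association list
def pvKnown : List (String × String) :=
  [("BTC", "BTC"), ("BITCOIN", "BTC"),
   ("ETH", "ETH"), ("ETHEREUM", "ETH"),
   ("SOL", "SOL"), ("SOLANA", "SOL"),
   ("BNB", "BNB"), ("XRP", "XRP"), ("RIPPLE", "XRP"),
   ("ADA", "ADA"), ("CARDANO", "ADA"),
   ("DOGE", "DOGE"), ("DOGECOIN", "DOGE"),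
   ("AVAX", "AVAX"), ("DOT", "DOT"), ("MATIC", "MATIC"),
   ("LINK", "LINK"), ("UNI", "UNI")]

def extract_crypto_symbols_py (title : String) : List String :=
  let hl := PySem.Str.upper title
  pvKnown.foldl
    (fun symbols p =>
      if PySem.Str.isIn p.1 hl && !symbols.contains p.2 then symbols ++ [p.2] else symbols)
    []

-- ===== PORT B =====
-- the grouped dict symbol -> keywords, in insertion order
def pvGroups : List (String × List String) :=
  [("BTC", ["BTC", "BITCOIN"]),
   ("ETH", ["ETH", "ETHEREUM"]),
   ("SOL", ["SOL", "SOLANA"]),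
   ("BNB", ["BNB"]),
   ("XRP", ["XRP", "RIPPLE"]),
   ("ADA", ["ADA", "CARDANO"]),
   ("DOGE", ["DOGE", "DOGECOIN"]),
   ("AVAX", ["AVAX"]),
   ("DOT", ["DOT"]),
   ("MATIC", ["MATIC"]),
   ("LINK", ["LINK"]),
   ("UNI", ["UNI"])]

def extract_crypto_symbols_py_alt (title : String) : List String :=
  let hl := PySem.Str.upper title
  (pvGroups.filter (fun g => g.2.any (fun k => PySem.Str.isIn k hl))).map Prod.fst

-- ===== PRECONDITION & SPEC =====
def Spec_extract_crypto_symbols_py (title : String) (out : List String) : Prop := out = extract_crypto_symbols_py_alt title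
instance (title : String) (out : List String) : Decidable (Spec_extract_crypto_symbols_py title out) := by unfold Spec_extract_crypto_symbols_py; infer_instance

-- ===== CLAIM (what is proved, stated in full; the proofs are below) =====
def Claim_equal_extract_crypto_symbols_py : Prop := ∀ (title : String), Dom_extract_crypto_symbols_py title → Spec_extract_crypto_symbols_py title (extract_crypto_symbols_py title)

-- ===== LEMMAS AND PROOFS =====

-- once the symbol s is already in the accumulator, A's loop over its keywords does nothing
theorem pvFold_of_contains (hl : String) (s : String) (kws : List String)
    (acc : List String) (h : acc.contains s = true) :
    kws.foldl
      (fun symbols k =>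
        if PySem.Str.isIn k hl && !symbols.contains s then symbols ++ [s] else symbols)
      acc = acc := by
  induction kws generalizing acc with
  | nil => rfl
  | cons k kws ih =>
    simp only [List.foldl_cons, h, Bool.not_true, Bool.and_false, Bool.false_eq_true, ite_false]
    exact ih acc h

-- A's loop over one symbol group appends s iff some keyword of the group matches
theorem pvFold_group (hl : String) (s : String) (kws : List String)
    (acc : List String) (h : acc.contains s = false) :
    kws.foldl
      (fun symbols k =>
        if PySem.Str.isIn k hl && !symbols.contains s then symbols ++ [s] else symbols)
      acc =
      (if kws.any (fun k => PySem.Str.isIn k hl) then acc ++ [s] else acc) := by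
  induction kws generalizing acc with
  | nil => simp
  | cons k kws ih =>
    by_cases hk : PySem.Str.isIn k hl = true
    · have hc : (acc ++ [s]).contains s = true := by
        simp
      simp only [List.foldl_cons, List.any_cons, hk, h, Bool.not_false, Bool.and_true,
        if_true, Bool.true_or]
      exact pvFold_of_contains hl s kws (acc ++ [s]) hc
    · simp only [List.foldl_cons, List.any_cons, Bool.eq_false_iff.mpr hk,
        Bool.false_and, Bool.false_eq_true, ite_false, Bool.false_or]
      exact ih acc h

-- A's fold over the flattened groups equals acc ++ the filtered symbol list,
-- provided the group symbols are distinct and none is in acc yet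
theorem pvFold_groups (hl : String) (groups : List (String × List String))
    (acc : List String)
    (hnd : (groups.map Prod.fst).Nodup)
    (h : ∀ g ∈ groups, acc.contains g.1 = false) :
    (groups.flatMap (fun g => g.2.map (fun k => (k, g.1)))).foldl
      (fun symbols p =>
        if PySem.Str.isIn p.1 hl && !symbols.contains p.2 then symbols ++ [p.2] else symbols)
      acc =
      acc ++ (groups.filter (fun g => g.2.any (fun k => PySem.Str.isIn k hl))).map Prod.fst := by
  induction groups generalizing acc with
  | nil => simp
  | cons g gs ih =>
    simp only [List.flatMap_cons, List.foldl_append, List.foldl_map]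
    rw [pvFold_group hl g.1 g.2 acc (h g (List.mem_cons_self))]
    rw [List.map_cons] at hnd
    obtain ⟨hnotmem, hnd'⟩ := List.nodup_cons.mp hnd
    have hne : ∀ g' ∈ gs, g'.1 ≠ g.1 := by
      intro g' hg' heq
      exact hnotmem (heq ▸ List.mem_map_of_mem hg')
    by_cases hm : g.2.any (fun k => PySem.Str.isIn k hl) = true
    · rw [if_pos hm]
      rw [ih (acc ++ [g.1]) hnd' ?_]
      · rw [List.filter_cons, if_pos hm]
        simp
      · intro g' hg'
        have h1 := h g' (List.mem_cons_of_mem g hg')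
        simp only [List.contains_append, h1, Bool.false_or]
        simp [hne g' hg']
    · rw [if_neg hm]
      rw [ih acc hnd' (fun g' hg' => h g' (List.mem_cons_of_mem g hg'))]
      rw [List.filter_cons, if_neg hm]

-- the flat dict of A is exactly the flattening of B's grouped dict
theorem pvKnown_eq_flatten :
    pvKnown = pvGroups.flatMap (fun g => g.2.map (fun k => (k, g.1))) := by decide

-- ===== VERDICT (by name: the statement is the Claim_ definition above) =====
theorem extract_crypto_symbols_py_spec : Claim_equal_extract_crypto_symbols_py := by
  intro title _
  unfold Spec_extract_crypto_symbols_py extract_crypto_symbols_py extract_crypto_symbols_py_alt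
  rw [pvKnown_eq_flatten,
    pvFold_groups (PySem.Str.upper title) pvGroups [] (by decide) (by intro g _; rfl)]
  simp
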